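-- pv_equiv track=rewrite | github.com/tofetpuzo/leetcode | datastructure&algorithms_leetcode/Graph_Trees/fiindAllPeopleWithSecret.py | findAllPeopleWithSecret
-- ===== SOURCE A (Python) =====
-- import collections
-- from typing import List
--
-- def findAllPeopleWithSecret(meetings: List[List[int]], firstPerson: int):
--     meetings.sort(key=lambda x : x[2])
--
--     meeting_dict = collections.defaultdict(list)
--
--     for person1, person2, time in meetings:
--         meeting_dict[time].append([person1, person2])
--
--     has_secret = set((0, firstPerson))
--
--     for times, meetings_persons in meeting_dict.items():
--         graph = collections.defaultdict(list)
--         seen = set()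
--
--         for person_1, person_2 in meetings_persons:
--             graph[person_1].append(person_2)
--             graph[person_2].append(person_1)
--             if person_1 in has_secret:
--                 seen.add(person_1)
--
--             if person_2 in has_secret:
--                 seen.add(person_2)
--
--         queue = collections.deque(seen)
--         while queue:
--             person = queue.popleft()
--
--             for nei in graph[person]:
--                 if nei not in has_secret:
--                     has_secret.add(nei)
--                     queue.append(nei)
--
--     return list(has_secret)
-- ===== SOURCE B (Python) =====
-- def findAllPeopleWithSecret(meetings, firstPerson):
--     meetings.sort(key=lambda x: x[2])
--     has_secret = {0, firstPerson}
--     times = []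
--     for m in meetings:
--         if m[2] not in times:
--             times.append(m[2])
--     for t in times:
--         pairs = [(m[0], m[1]) for m in meetings if m[2] == t]
--         frontier = []
--         for u, v in pairs:
--             for p in (u, v):
--                 if p in has_secret and p not in frontier:
--                     frontier.append(p)
--         while frontier:
--             nxt = []
--             for p in frontier:
--                 for u, v in pairs:
--                     for q in ([v] if u == p else []) + ([u] if v == p else []):
--                         if q not in has_secret:
--                             has_secret.add(q)
--                             nxt.append(q)
--             frontier = nxt
--     return list(has_secret)
-- ===== Notes on version B (the rewrite author's own statement) =====
-- stated objective: alternative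
-- what changed: Replaces A's defaultdict time-grouping, per-group adjacency-dict and deque BFS by a dict-free formulation: sort, collect the distinct times in order, filter each time's pairs out of the sorted list, and spread the secret by level-synchronous frontier expansion scanning the raw pair list (no graph structure, no queue).
-- outside the precondition, e.g. on findAllPeopleWithSecret([[1, 2]], 0): A raises IndexError, B raises IndexError; on findAllPeopleWithSecret([[0, 1, 5, 9]], 0): A raises ValueError, B returns [0, 1]
import Mathlib
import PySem

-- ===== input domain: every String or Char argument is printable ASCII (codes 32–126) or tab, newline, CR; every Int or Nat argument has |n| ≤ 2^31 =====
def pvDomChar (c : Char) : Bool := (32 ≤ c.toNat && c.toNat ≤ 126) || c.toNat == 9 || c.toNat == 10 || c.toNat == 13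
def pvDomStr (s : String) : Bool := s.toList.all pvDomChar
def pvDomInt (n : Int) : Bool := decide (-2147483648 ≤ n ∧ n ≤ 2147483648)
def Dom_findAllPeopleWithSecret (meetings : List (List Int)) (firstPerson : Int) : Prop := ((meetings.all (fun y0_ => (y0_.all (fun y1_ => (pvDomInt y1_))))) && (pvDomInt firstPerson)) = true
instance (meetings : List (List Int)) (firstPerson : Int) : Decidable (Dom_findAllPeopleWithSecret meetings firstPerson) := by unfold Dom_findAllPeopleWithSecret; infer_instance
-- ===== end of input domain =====

-- B replaces A's defaultdict grouping, adjacency dict and deque BFS by a dict-free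
-- distinct-times + filter grouping with level-synchronous frontier expansion over the raw
-- pair list (objective: alternative, not faster).  Both A and B sort `meetings` in place
-- (same mutation); the equivalence proved here is about the return value.

-- shared transliterations of the Python subscripts m[0], m[1], m[2] (exact under Pre_)
def pvU (m : List Int) : Int := PySem.List.pyGetD m 0 0
def pvV (m : List Int) : Int := PySem.List.pyGetD m 1 0
def pvKey (m : List Int) : Int := PySem.List.pyGetD m 2 0

-- ===== PORT A =====
-- the `while queue:` loop; fuel only guards totality (chosen large enough, see proofs)
def bfsA (graph : PySem.Dict Int (List Int)) : PySem.Set Int → List Int → Nat → PySem.Set Int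
  | hs, _, 0 => hs
  | hs, [], _ => hs
  | hs, p :: rest, Nat.succ f =>
      let st := (graph.getD p []).foldl
        (fun (st : PySem.Set Int × List Int) nei =>
          if PySem.Set.contains st.1 nei then st else (PySem.Set.add st.1 nei, st.2 ++ [nei]))
        (hs, rest)
      bfsA graph st.1 st.2 f

def findAllPeopleWithSecret (meetings : List (List Int)) (firstPerson : Int) : List Int :=
  let sortedM := PySem.List.sorted meetings pvKey false
  let meetingDict : PySem.Dict Int (List (List Int)) :=
    sortedM.foldl (fun d m => d.modify (pvKey m) [] (fun g => g ++ [[pvU m, pvV m]]))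
      PySem.Dict.empty
  let hs0 : PySem.Set Int := PySem.Set.ofList [0, firstPerson]
  meetingDict.items.foldl (fun hs tg =>
    let gs := tg.2.foldl
      (fun (p : PySem.Dict Int (List Int) × PySem.Set Int) row =>
        ((p.1.modify (pvU row) [] (fun l => l ++ [pvV row])).modify (pvV row) []
            (fun l => l ++ [pvU row]),
         (fun s1 => if PySem.Set.contains hs (pvV row) then PySem.Set.add s1 (pvV row) else s1)
           (if PySem.Set.contains hs (pvU row) then PySem.Set.add p.2 (pvU row) else p.2)))
      (PySem.Dict.empty, PySem.Set.empty)
    bfsA gs.1 hs gs.2 (gs.2.length + 4 * tg.2.length)) hs0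

-- ===== PORT B =====
-- the `while frontier:` loop; fuel only guards totality (chosen large enough, see proofs)
def bfsB (pairs : List (Int × Int)) : PySem.Set Int → List Int → Nat → PySem.Set Int
  | hs, _, 0 => hs
  | hs, [], _ => hs
  | hs, front, Nat.succ f =>
      let st := front.foldl (fun st0 p =>
          pairs.foldl (fun st1 uv =>
            ((if uv.1 == p then [uv.2] else []) ++ (if uv.2 == p then [uv.1] else [])).foldl
              (fun (st2 : PySem.Set Int × List Int) q =>
                if PySem.Set.contains st2.1 q then st2
                else (PySem.Set.add st2.1 q, st2.2 ++ [q])) st1) st0)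
        (hs, ([] : List Int))
      bfsB pairs st.1 st.2 f

def findAllPeopleWithSecret_alt (meetings : List (List Int)) (firstPerson : Int) : List Int :=
  let sortedM := PySem.List.sorted meetings pvKey false
  let times : List Int :=
    sortedM.foldl (fun ts m => if ts.contains (pvKey m) then ts else ts ++ [pvKey m]) []
  times.foldl (fun hs t =>
    let pairs := (sortedM.filter (fun m => pvKey m == t)).map (fun m => (pvU m, pvV m))
    let frontier := pairs.foldl (fun fr uv =>
        [uv.1, uv.2].foldl
          (fun (fr2 : List Int) p =>
            if PySem.Set.contains hs p && !(fr2.contains p) then fr2 ++ [p] else fr2) fr) []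
    bfsB pairs hs frontier (frontier.length + 4 * pairs.length))
    (PySem.Set.ofList [0, firstPerson])

-- ===== PRECONDITION & SPEC =====
-- Pre_ excludes exactly the inputs on which the Python A raises (IndexError in the sort key
-- for a row shorter than 3, ValueError unpacking a row whose length is not 3).
def Pre_findAllPeopleWithSecret (meetings : List (List Int)) (firstPerson : Int) : Prop :=
  ∀ m ∈ meetings, m.length = 3
instance (meetings : List (List Int)) (firstPerson : Int) : Decidable (Pre_findAllPeopleWithSecret meetings firstPerson) := by unfold Pre_findAllPeopleWithSecret; infer_instance
def pvWitness_findAllPeopleWithSecret : List (List Int) × Int := ([[0, 1, 2], [1, 3, 1]], 3)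

def Spec_findAllPeopleWithSecret (meetings : List (List Int)) (firstPerson : Int) (out : List Int) : Prop := out = findAllPeopleWithSecret_alt meetings firstPerson
instance (meetings : List (List Int)) (firstPerson : Int) (out : List Int) : Decidable (Spec_findAllPeopleWithSecret meetings firstPerson out) := by unfold Spec_findAllPeopleWithSecret; infer_instance

-- ===== CLAIM (what is proved, stated in full; the proofs are below) =====
def Claim_equal_findAllPeopleWithSecret : Prop := ∀ (meetings : List (List Int)) (firstPerson : Int), Dom_findAllPeopleWithSecret meetings firstPerson → Pre_findAllPeopleWithSecret meetings firstPerson → Spec_findAllPeopleWithSecret meetings firstPerson (findAllPeopleWithSecret meetings firstPerson)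

-- ===== LEMMAS AND PROOFS =====

-- neighbours of p read off the raw pair list, in scan order
def pvNbrs (pairs : List (Int × Int)) (p : Int) : List Int :=
  pairs.flatMap (fun uv => (if uv.1 == p then [uv.2] else []) ++ (if uv.2 == p then [uv.1] else []))

-- the shared "absorb unseen elements" inner loop
def pvAbsorb (st : PySem.Set Int × List Int) (ns : List Int) : PySem.Set Int × List Int :=
  ns.foldl (fun (st : PySem.Set Int × List Int) q =>
    if PySem.Set.contains st.1 q then st else (PySem.Set.add st.1 q, st.2 ++ [q])) st

-- one whole BFS level
def pvExpand (pairs : List (Int × Int)) (st : PySem.Set Int × List Int) (front : List Int) :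
    PySem.Set Int × List Int :=
  front.foldl (fun st p => pvAbsorb st (pvNbrs pairs p)) st

def pvEndpoints (pairs : List (Int × Int)) : List Int := pairs.flatMap (fun uv => [uv.1, uv.2])

def pvMissing (pairs : List (Int × Int)) (hs : PySem.Set Int) : Nat :=
  ((PySem.Set.ofList (pvEndpoints pairs)).filter (fun x => decide (x ∉ hs))).length

theorem bfsA_nil (g : PySem.Dict Int (List Int)) (hs : PySem.Set Int) (f : Nat) :
    bfsA g hs [] f = hs := by cases f <;> rfl

theorem bfsB_nil (pairs : List (Int × Int)) (hs : PySem.Set Int) (f : Nat) :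
    bfsB pairs hs [] f = hs := by cases f <;> rfl

theorem pvAbsorb_cons (st : PySem.Set Int × List Int) (q : Int) (ns : List Int) :
    pvAbsorb st (q :: ns) =
      pvAbsorb (if PySem.Set.contains st.1 q then st else (PySem.Set.add st.1 q, st.2 ++ [q])) ns := rfl

theorem pvAbsorb_acc (ns : List Int) (hs : PySem.Set Int) (acc : List Int) :
    pvAbsorb (hs, acc) ns = ((pvAbsorb (hs, []) ns).1, acc ++ (pvAbsorb (hs, []) ns).2) := by
  induction ns generalizing hs acc with
  | nil => simp [pvAbsorb]
  | cons q ns ih =>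
    rw [pvAbsorb_cons, pvAbsorb_cons]
    cases hc : PySem.Set.contains hs q with
    | true => simp only [hc, if_true]; exact ih hs acc
    | false =>
      simp only [hc, Bool.false_eq_true, if_false]
      rw [ih (PySem.Set.add hs q) (acc ++ [q]), ih (PySem.Set.add hs q) ([] ++ [q])]
      simp

theorem pvAbsorb_inv (ns : List Int) (hs : PySem.Set Int) :
    (pvAbsorb (hs, []) ns).1 = hs ++ (pvAbsorb (hs, []) ns).2 ∧
    (pvAbsorb (hs, []) ns).2.Nodup ∧
    (∀ x ∈ (pvAbsorb (hs, []) ns).2, x ∈ ns ∧ x ∉ hs) := by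
  induction ns generalizing hs with
  | nil => simp [pvAbsorb]
  | cons q ns ih =>
    rw [pvAbsorb_cons]
    cases hc : PySem.Set.contains hs q with
    | true =>
      simp only [hc, if_true]
      obtain ⟨h1, h2, h3⟩ := ih hs
      exact ⟨h1, h2, fun x hx => ⟨List.mem_cons_of_mem _ (h3 x hx).1, (h3 x hx).2⟩⟩
    | false =>
      have hq : q ∉ hs := by
        intro hmem
        rw [(PySem.Set.contains_iff hs q).2 hmem] at hc
        exact Bool.true_eq_false.mp hc
      simp only [Bool.false_eq_true, if_false, List.nil_append]
      rw [PySem.Set.add_of_not_mem hq, pvAbsorb_acc ns (hs ++ [q]) [q], List.singleton_append]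
      obtain ⟨h1, h2, h3⟩ := ih (hs ++ [q])
      dsimp only
      refine ⟨by simp [h1], ?_, ?_⟩
      · refine List.nodup_cons.2 ⟨fun hmem => ?_, h2⟩
        have := (h3 q hmem).2
        simp at this
      · intro x hx
        rcases List.mem_cons.1 hx with rfl | hx
        · exact ⟨List.mem_cons_self, hq⟩
        · refine ⟨List.mem_cons_of_mem _ (h3 x hx).1, fun hmem => (h3 x hx).2 (by simp [hmem])⟩

theorem pvExpand_cons (pairs : List (Int × Int)) (st : PySem.Set Int × List Int) (p : Int)
    (front : List Int) :
    pvExpand pairs st (p :: front) = pvExpand pairs (pvAbsorb st (pvNbrs pairs p)) front := rfl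

theorem pvExpand_acc (front : List Int) (pairs : List (Int × Int)) (hs : PySem.Set Int)
    (acc : List Int) :
    pvExpand pairs (hs, acc) front =
      ((pvExpand pairs (hs, []) front).1, acc ++ (pvExpand pairs (hs, []) front).2) := by
  induction front generalizing hs acc with
  | nil => simp [pvExpand]
  | cons p front ih =>
    rw [pvExpand_cons, pvExpand_cons, pvAbsorb_acc, pvAbsorb_acc _ _ ([] : List Int),
        List.nil_append]
    rw [ih, ih ((pvAbsorb (hs, []) (pvNbrs pairs p)).1) ((pvAbsorb (hs, []) (pvNbrs pairs p)).2)]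
    simp

theorem pvNbrs_subset (pairs : List (Int × Int)) (p x : Int) (hx : x ∈ pvNbrs pairs p) :
    x ∈ pvEndpoints pairs := by
  simp only [pvNbrs, List.mem_flatMap, List.mem_append] at hx
  obtain ⟨uv, huv, h⟩ := hx
  simp only [pvEndpoints, List.mem_flatMap]
  refine ⟨uv, huv, ?_⟩
  rcases h with h | h <;> split_ifs at h <;> simp_all

theorem pvExpand_inv (front : List Int) (pairs : List (Int × Int)) (hs : PySem.Set Int) :
    (pvExpand pairs (hs, []) front).1 = hs ++ (pvExpand pairs (hs, []) front).2 ∧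
    (pvExpand pairs (hs, []) front).2.Nodup ∧
    (∀ x ∈ (pvExpand pairs (hs, []) front).2, x ∈ pvEndpoints pairs ∧ x ∉ hs) := by
  induction front generalizing hs with
  | nil => simp [pvExpand]
  | cons p front ih =>
    rw [pvExpand_cons]
    obtain ⟨a1, a2, a3⟩ := pvAbsorb_inv (pvNbrs pairs p) hs
    rw [pvExpand_acc, a1]
    obtain ⟨h1, h2, h3⟩ := ih (hs ++ (pvAbsorb (hs, []) (pvNbrs pairs p)).2)
    dsimp only
    refine ⟨by rw [h1, List.append_assoc], ?_, ?_⟩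
    · refine List.Nodup.append a2 h2 (fun x hx1 hx2 => ?_)
      have := (h3 x hx2).2
      exact this (List.mem_append_right _ hx1)
    · intro x hx
      rcases List.mem_append.1 hx with hx | hx
      · exact ⟨pvNbrs_subset pairs p x (a3 x hx).1, (a3 x hx).2⟩
      · exact ⟨(h3 x hx).1, fun hm => (h3 x hx).2 (List.mem_append_left _ hm)⟩

theorem pvFilter_split (q r : Int → Bool) : ∀ (L : List Int),
    (∀ x ∈ L, ¬(q x = true ∧ r x = true)) →
    (L.filter (fun x => q x || r x)).length = (L.filter q).length + (L.filter r).length := by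
  intro L
  induction L with
  | nil => simp
  | cons a L ih =>
    intro h
    have hL := ih (fun x hx => h x (List.mem_cons_of_mem _ hx))
    have ha := h a List.mem_cons_self
    by_cases hq : q a = true
    · by_cases hr : r a = true
      · exact absurd ⟨hq, hr⟩ ha
      · simp [hq, hr, hL]; omega
    · by_cases hr : r a = true
      · simp [hq, hr, hL]; omega
      · simp [hq, hr, hL]

theorem pvMissing_append (pairs : List (Int × Int)) (hs : PySem.Set Int) (nw : List Int)
    (hnd : nw.Nodup) (hsub : ∀ x ∈ nw, x ∈ pvEndpoints pairs ∧ x ∉ hs) :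
    pvMissing pairs hs = pvMissing pairs (hs ++ nw) + nw.length := by
  unfold pvMissing
  have hper : ((PySem.Set.ofList (pvEndpoints pairs)).filter (fun x => decide (x ∈ nw))).Perm nw := by
    apply (List.perm_ext_iff_of_nodup (List.Nodup.filter _ (PySem.Set.nodup_ofList _)) hnd).2
    intro x
    simp only [List.mem_filter, PySem.Set.mem_ofList, decide_eq_true_eq]
    exact ⟨fun h => h.2, fun h => ⟨(hsub x h).1, h⟩⟩
  have hlen := hper.length_eq
  rw [← hlen]
  have := pvFilter_split (fun x => decide (x ∉ hs ++ nw)) (fun x => decide (x ∈ nw))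
    (PySem.Set.ofList (pvEndpoints pairs)) ?_
  · rw [← this]
    congr 1
    apply List.filter_congr
    intro x _
    by_cases hx : x ∈ nw
    · simp [hx, (hsub x hx).2]
    · by_cases hh : x ∈ hs <;> simp [hx, hh]
  · intro x _
    rintro ⟨h1, h2⟩
    simp only [decide_eq_true_eq] at h1 h2
    exact h1 (List.mem_append_right _ h2)

theorem pvMissing_expand (pairs : List (Int × Int)) (hs : PySem.Set Int) (front : List Int) :
    pvMissing pairs hs =
      pvMissing pairs (pvExpand pairs (hs, []) front).1 + (pvExpand pairs (hs, []) front).2.length := by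
  obtain ⟨h1, h2, h3⟩ := pvExpand_inv front pairs hs
  rw [h1]
  exact pvMissing_append pairs hs _ h2 h3

theorem bfsA_cons (graph : PySem.Dict Int (List Int)) (hs : PySem.Set Int) (p : Int)
    (rest : List Int) (f : Nat) :
    bfsA graph hs (p :: rest) (f + 1) =
      bfsA graph (pvAbsorb (hs, rest) (graph.getD p [])).1
        (pvAbsorb (hs, rest) (graph.getD p [])).2 f := rfl

theorem bfsA_peel (graph : PySem.Dict Int (List Int)) (pairs : List (Int × Int))
    (hg : ∀ p, graph.getD p [] = pvNbrs pairs p)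
    (q1 : List Int) : ∀ (tail : List Int) (hs : PySem.Set Int) (f : Nat),
    bfsA graph hs (q1 ++ tail) (q1.length + f) =
      bfsA graph (pvExpand pairs (hs, []) q1).1 (tail ++ (pvExpand pairs (hs, []) q1).2) f := by
  induction q1 with
  | nil => intro tail hs f; simp [pvExpand]
  | cons p q1 ih =>
    intro tail hs f
    have hlen : (p :: q1).length + f = (q1.length + f) + 1 := by simp; omega
    rw [hlen, List.cons_append, bfsA_cons, hg p, pvAbsorb_acc]
    dsimp only
    rw [List.append_assoc, ih (tail ++ (pvAbsorb (hs, []) (pvNbrs pairs p)).2)]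
    rw [pvExpand_cons]
    conv_rhs => rw [show pvAbsorb (hs, []) (pvNbrs pairs p)
        = ((pvAbsorb (hs, []) (pvNbrs pairs p)).1, (pvAbsorb (hs, []) (pvNbrs pairs p)).2) from rfl,
      pvExpand_acc]
    simp

theorem pvFoldl_flatMap {α β σ : Type} (l : List α) (g : α → List β) (f : σ → β → σ) :
    ∀ (init : σ), (l.flatMap g).foldl f init = l.foldl (fun acc x => (g x).foldl f acc) init := by
  induction l with
  | nil => intro init; rfl
  | cons a l ih => intro init; rw [List.flatMap_cons, List.foldl_append, List.foldl_cons, ih]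

theorem bfsB_step (pairs : List (Int × Int)) (hs : PySem.Set Int) (p : Int) (front : List Int)
    (f : Nat) :
    bfsB pairs hs (p :: front) (f + 1) =
      bfsB pairs (pvExpand pairs (hs, []) (p :: front)).1 (pvExpand pairs (hs, []) (p :: front)).2 f := by
  show bfsB pairs ((p :: front).foldl (fun st0 p =>
          pairs.foldl (fun st1 uv =>
            ((if uv.1 == p then [uv.2] else []) ++ (if uv.2 == p then [uv.1] else [])).foldl
              (fun (st2 : PySem.Set Int × List Int) q =>
                if PySem.Set.contains st2.1 q then st2
                else (PySem.Set.add st2.1 q, st2.2 ++ [q])) st1) st0)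
        (hs, ([] : List Int))).1 _ f = _
  have hfun : (fun (st0 : PySem.Set Int × List Int) p =>
      pairs.foldl (fun st1 uv =>
        ((if uv.1 == p then [uv.2] else []) ++ (if uv.2 == p then [uv.1] else [])).foldl
          (fun (st2 : PySem.Set Int × List Int) q =>
            if PySem.Set.contains st2.1 q then st2
            else (PySem.Set.add st2.1 q, st2.2 ++ [q])) st1) st0)
      = (fun st0 p => pvAbsorb st0 (pvNbrs pairs p)) := by
    funext st0 p
    rw [pvAbsorb, pvNbrs, pvFoldl_flatMap]
  rw [hfun]
  rfl

theorem bfs_main (pairs : List (Int × Int)) (graph : PySem.Dict Int (List Int))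
    (hg : ∀ p, graph.getD p [] = pvNbrs pairs p) :
    ∀ n hs q fA fB, q.length + 2 * pvMissing pairs hs ≤ n →
      q.length + 2 * pvMissing pairs hs ≤ fA → q.length + 2 * pvMissing pairs hs ≤ fB →
      bfsA graph hs q fA = bfsB pairs hs q fB := by
  intro n
  induction n using Nat.strong_induction_on with
  | _ n ih =>
    intro hs q fA fB hn hA hB
    match q with
    | [] => rw [bfsA_nil, bfsB_nil]
    | p :: rest =>
      set q := p :: rest with hq
      have hq1 : 1 ≤ q.length := by simp [hq]
      -- peel A through the whole queue
      have hfA : fA = q.length + (fA - q.length) := by omega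
      have hfB : fB = (fB - 1) + 1 := by omega
      rw [hfA, Nat.add_comm q.length (fA - q.length),
          show bfsA graph hs q (fA - q.length + q.length)
             = bfsA graph hs (q ++ []) (q.length + (fA - q.length)) by
            rw [List.append_nil, Nat.add_comm],
          bfsA_peel graph pairs hg q [] hs (fA - q.length), List.nil_append]
      rw [hfB, hq, bfsB_step pairs hs p rest (fB - 1), ← hq]
      -- cost decreases strictly
      have hmiss := pvMissing_expand pairs hs q
      obtain ⟨he1, he2, he3⟩ := pvExpand_inv q pairs hs
      have hcost : (pvExpand pairs (hs, []) q).2.length +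
          2 * pvMissing pairs (pvExpand pairs (hs, []) q).1 ≤ 2 * pvMissing pairs hs := by
        omega
      exact ih (2 * pvMissing pairs hs) (by omega) _ _ _ _ hcost (by omega) (by omega)

theorem graph_getD (pairs : List (Int × Int)) (p : Int) :
    ∀ (d : PySem.Dict Int (List Int)),
    (pairs.foldl (fun d uv => (d.modify uv.1 [] (fun l => l ++ [uv.2])).modify uv.2 []
        (fun l => l ++ [uv.1])) d).getD p [] = d.getD p [] ++ pvNbrs pairs p := by
  induction pairs with
  | nil => intro d; simp [pvNbrs]
  | cons uv rest ih =>
    intro d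
    obtain ⟨u, v⟩ := uv
    rw [List.foldl_cons, ih]
    have hA : ∀ x, ((d.modify u [] (fun l => l ++ [v])).getD x [])
        = if x = u then d.getD u [] ++ [v] else d.getD x [] :=
      fun x => by rw [PySem.Dict.getD_modify]
    have hd : ((d.modify u [] (fun l => l ++ [v])).modify v [] (fun l => l ++ [u])).getD p []
        = d.getD p [] ++ ((if u == p then [v] else []) ++ (if v == p then [u] else [])) := by
      rw [PySem.Dict.getD_modify]
      by_cases h2 : p = v
      · subst h2
        rw [if_pos rfl, hA p]
        by_cases h1 : p = u
        · subst h1; simp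
        · have h1' : ¬(u = p) := fun h => h1 h.symm
          rw [if_neg h1]
          simp [h1', beq_iff_eq]
      · have h2' : ¬(v = p) := fun h => h2 h.symm
        rw [if_neg h2, hA p]
        by_cases h1 : p = u
        · subst h1; simp [h2', beq_iff_eq]
        · have h1' : ¬(u = p) := fun h => h1 h.symm
          rw [if_neg h1]
          simp [h1', h2', beq_iff_eq]
    have hsplit : pvNbrs ((u, v) :: rest) p
        = ((if u == p then [v] else []) ++ (if v == p then [u] else [])) ++ pvNbrs rest p := by
      rw [pvNbrs, List.flatMap_cons]; rfl
    rw [hd, hsplit, List.append_assoc]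

-- clean (beta/zeta-reduced) restatements of the two ports' bodies
def pvGStep (d : PySem.Dict Int (List Int)) (row : List Int) : PySem.Dict Int (List Int) :=
  (d.modify (pvU row) [] (fun l => l ++ [pvV row])).modify (pvV row) [] (fun l => l ++ [pvU row])

def pvSStep (hs s : PySem.Set Int) (row : List Int) : PySem.Set Int :=
  if PySem.Set.contains hs (pvV row) then
    PySem.Set.add (if PySem.Set.contains hs (pvU row) then PySem.Set.add s (pvU row) else s) (pvV row)
  else (if PySem.Set.contains hs (pvU row) then PySem.Set.add s (pvU row) else s)

def pvFA (hs : PySem.Set Int) (tg : Int × List (List Int)) : PySem.Set Int :=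
  let gs := tg.2.foldl (fun p row => (pvGStep p.1 row, pvSStep hs p.2 row))
    (PySem.Dict.empty, PySem.Set.empty)
  bfsA gs.1 hs gs.2 (gs.2.length + 4 * tg.2.length)

def pvRows (sM : List (List Int)) (t : Int) : List (List Int) :=
  (sM.filter (fun m => pvKey m == t)).map (fun m => [pvU m, pvV m])

def pvPairs (sM : List (List Int)) (t : Int) : List (Int × Int) :=
  (sM.filter (fun m => pvKey m == t)).map (fun m => (pvU m, pvV m))

def pvFB (sM : List (List Int)) (hs : PySem.Set Int) (t : Int) : PySem.Set Int :=
  let pairs := pvPairs sM t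
  let frontier := pairs.foldl (fun fr uv =>
      [uv.1, uv.2].foldl
        (fun (fr2 : List Int) p =>
          if PySem.Set.contains hs p && !(fr2.contains p) then fr2 ++ [p] else fr2) fr) []
  bfsB pairs hs frontier (frontier.length + 4 * pairs.length)

def pvDictOf (sM : List (List Int)) : PySem.Dict Int (List (List Int)) :=
  sM.foldl (fun d m => d.modify (pvKey m) [] (fun g => g ++ [[pvU m, pvV m]])) PySem.Dict.empty

theorem A_eq (meetings : List (List Int)) (firstPerson : Int) :
    findAllPeopleWithSecret meetings firstPerson =
      (pvDictOf (PySem.List.sorted meetings pvKey false)).items.foldl pvFA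
        (PySem.Set.ofList [0, firstPerson]) := rfl

theorem B_eq (meetings : List (List Int)) (firstPerson : Int) :
    findAllPeopleWithSecret_alt meetings firstPerson =
      ((PySem.List.sorted meetings pvKey false).foldl
          (fun ts m => if ts.contains (pvKey m) then ts else ts ++ [pvKey m]) []).foldl
        (pvFB (PySem.List.sorted meetings pvKey false)) (PySem.Set.ofList [0, firstPerson]) := rfl

theorem pvU_pair (a b : Int) : pvU [a, b] = a := by
  simp [pvU]

theorem pvV_pair (a b : Int) : pvV [a, b] = b := by
  rw [pvV, show (1 : Int) = ((1 : Nat) : Int) by norm_num, PySem.List.pyGetD_natCast]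
  rfl

theorem pvRows_eq (sM : List (List Int)) (t : Int) :
    pvRows sM t = (pvPairs sM t).map (fun uv => [uv.1, uv.2]) := by
  rw [pvRows, pvPairs, List.map_map]
  rfl

theorem pvEndpoints_length (pairs : List (Int × Int)) :
    (pvEndpoints pairs).length = 2 * pairs.length := by
  induction pairs with
  | nil => rfl
  | cons uv rest ih => simp [pvEndpoints, List.flatMap_cons] at ih ⊢; omega

theorem pvAdd_ite (hs s : PySem.Set Int) (p : Int) :
    (if PySem.Set.contains hs p then PySem.Set.add s p else s) =
      if PySem.Set.contains hs p && !(List.contains s p) then s ++ [p] else s := by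
  cases hc : PySem.Set.contains hs p with
  | false => simp
  | true =>
    by_cases hm : p ∈ s
    · simp [hm]
    · simp [hm]

theorem pvPair_fold (hs : PySem.Set Int) (rows : List (List Int)) (d : PySem.Dict Int (List Int))
    (s : PySem.Set Int) :
    rows.foldl (fun p row => (pvGStep p.1 row, pvSStep hs p.2 row)) (d, s) =
      (rows.foldl pvGStep d, rows.foldl (pvSStep hs) s) := by
  induction rows generalizing d s with
  | nil => rfl
  | cons r rows ih => rw [List.foldl_cons, List.foldl_cons, List.foldl_cons]; exact ih _ _

theorem group_eq (sM : List (List Int)) (hs : PySem.Set Int) (t : Int) :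
    pvFA hs (t, pvRows sM t) = pvFB sM hs t := by
  rw [pvFA, pvFB]
  set pairs := pvPairs sM t with hpairs
  dsimp only
  rw [pvPair_fold]
  dsimp only
  -- the graph lookups are the pair-list neighbour scans
  have hgraph : (pvRows sM t).foldl pvGStep PySem.Dict.empty =
      pairs.foldl (fun d uv => (d.modify uv.1 [] (fun l => l ++ [uv.2])).modify uv.2 []
        (fun l => l ++ [uv.1])) PySem.Dict.empty := by
    rw [pvRows_eq, List.foldl_map]
    apply PySem.List.foldl_congr_mem
    intro d uv _
    rw [pvGStep, pvU_pair, pvV_pair]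
  have hg : ∀ p, ((pvRows sM t).foldl pvGStep PySem.Dict.empty).getD p [] = pvNbrs pairs p := by
    intro p
    rw [hgraph, graph_getD]
    simp [PySem.Dict.getD_empty]
  -- the seen set is the frontier list
  have hseen : (pvRows sM t).foldl (pvSStep hs) PySem.Set.empty =
      pairs.foldl (fun fr uv =>
        [uv.1, uv.2].foldl
          (fun (fr2 : List Int) p =>
            if PySem.Set.contains hs p && !(fr2.contains p) then fr2 ++ [p] else fr2) fr) [] := by
    rw [pvRows_eq, List.foldl_map]
    apply PySem.List.foldl_congr_mem
    intro s uv _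
    rw [pvSStep, pvU_pair, pvV_pair, List.foldl_cons, List.foldl_cons, List.foldl_nil,
        ← pvAdd_ite hs s uv.1, ← pvAdd_ite hs _ uv.2]
  rw [hseen]
  -- both BFS runs compute the same set
  have hrl : (pvRows sM t).length = pairs.length := by
    rw [pvRows_eq, List.length_map]
  have hm : pvMissing pairs hs ≤ 2 * pairs.length := by
    have h1 : ((PySem.Set.ofList (pvEndpoints pairs)).filter
        (fun x => decide (x ∉ hs))).length ≤ (PySem.Set.ofList (pvEndpoints pairs)).length :=
      List.length_filter_le _ _
    have h2 := PySem.Set.length_ofList_le (pvEndpoints pairs)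
    have h3 := pvEndpoints_length pairs
    unfold pvMissing
    omega
  set sn := pairs.foldl (fun fr uv =>
        [uv.1, uv.2].foldl
          (fun (fr2 : List Int) p =>
            if PySem.Set.contains hs p && !(fr2.contains p) then fr2 ++ [p] else fr2) fr) []
  rw [hrl]
  exact bfs_main pairs _ hg (sn.length + 2 * pvMissing pairs hs) hs sn _ _ (le_refl _)
    (by omega) (by omega)

-- grouping: the insertion-ordered dict of A lists each distinct time once, in order,
-- with exactly the filtered rows as its value
theorem dict_items (sM : List (List Int)) :
    (pvDictOf sM).items =
      (PySem.Set.ofList (sM.map pvKey)).map (fun t => (t, pvRows sM t)) := by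
  have hnd : (pvDictOf sM).keys.Nodup := by
    apply PySem.Dict.nodup_keys_foldl_modify_key
    exact PySem.Dict.nodup_keys_empty
  have hkeys : (pvDictOf sM).keys = PySem.Set.ofList (sM.map pvKey) := by
    rw [pvDictOf, PySem.Dict.keys_foldl_modify_key]
    rw [PySem.Dict.keys_empty, PySem.Set.update_nil_left]
  have hget : ∀ t, (pvDictOf sM).getD t [] = pvRows sM t := by
    intro t
    have : pvDictOf sM = (sM.map (fun m => (pvKey m, [pvU m, pvV m]))).foldl
        (fun d p => d.modify p.1 [] (fun g => g ++ [p.2])) PySem.Dict.empty := by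
      rw [pvDictOf, List.foldl_map]
    rw [this, PySem.Dict.getD_foldl_modify_append, PySem.Dict.getD_empty, List.nil_append,
        List.filter_map, pvRows, List.map_map]
    rfl
  rw [PySem.Dict.items_eq_map_keys _ hnd [], hkeys]
  apply List.map_congr_left
  intro t _
  rw [hget]

theorem times_eq (sM : List (List Int)) :
    sM.foldl (fun ts m => if ts.contains (pvKey m) then ts else ts ++ [pvKey m]) [] =
      PySem.Set.ofList (sM.map pvKey) := by
  rw [PySem.Set.ofList_eq_foldl, List.foldl_map]
  apply PySem.List.foldl_congr_mem
  intro ts m _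
  rw [PySem.Set.add_eq_ite]
  by_cases h : pvKey m ∈ ts <;> simp [h]

-- ===== VERDICT (by name: the statement is the Claim_ definition above) =====
theorem findAllPeopleWithSecret_spec : Claim_equal_findAllPeopleWithSecret := by
  intro meetings firstPerson _ _
  unfold Spec_findAllPeopleWithSecret
  rw [A_eq, B_eq, times_eq, dict_items, List.foldl_map]
  apply PySem.List.foldl_congr_mem
  intro hs t _
  exact group_eq _ hs t
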